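-- pv_equiv track=rewrite | github.com/wekt0r/uni | Python/p11z4.py | ppn
-- ===== SOURCE A (Python) =====
-- def make_values(list,dict):
-- 	if list == []:
-- 		return 0
-- 	if list[0] in dict.keys():
-- 		make_values(list[1:],dict)
-- 	else:
-- 		dict[list[0]] = max(dict.values()) + 1
-- 		make_values(list[1:],dict)
--
-- def ppn(word):
-- 	word = list(word)
-- 	result = []
-- 	values = {word[0]: 1}
-- 	make_values(word[1:],values)
-- 	for letter in word:
-- 		result.append(str(values[letter]))
-- 	result = "-".join(result)
-- 	return result
-- ===== SOURCE B (Python) =====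
-- def ppn(word):
--     values = {}
--     nxt = 1
--     for ch in word:
--         if ch not in values:
--             values[ch] = nxt
--             nxt += 1
--     return "-".join(str(values[ch]) for ch in word)
-- ===== Notes on version B (the rewrite author's own statement) =====
-- stated objective: faster
-- what changed: Replaced the per-character recursion that recomputes max(dict.values()) (an O(k) scan per new letter) with a single linear pass keeping a running next-value counter, and dropped the separate list/slicing recursion.
import Mathlib
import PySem

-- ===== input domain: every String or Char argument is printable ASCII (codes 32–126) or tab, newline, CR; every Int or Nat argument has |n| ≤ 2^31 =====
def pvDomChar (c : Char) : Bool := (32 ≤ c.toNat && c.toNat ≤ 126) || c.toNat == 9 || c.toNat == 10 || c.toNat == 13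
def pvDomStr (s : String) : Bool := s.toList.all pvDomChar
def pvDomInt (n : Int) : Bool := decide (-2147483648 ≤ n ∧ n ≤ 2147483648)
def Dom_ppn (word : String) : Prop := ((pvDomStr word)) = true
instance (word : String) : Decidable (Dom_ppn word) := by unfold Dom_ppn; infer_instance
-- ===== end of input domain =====

-- B replaces A's per-letter max(dict.values()) scan and slicing recursion by one linear pass
-- with a running next-value counter (objective: faster).

-- ===== PORT A =====
-- max(dict.values()): the dict here is never empty on reachable calls, so the getD 0 default is never used
def mvMax (d : PySem.Dict Char Int) : Int := (PySem.List.max? d.values (fun v => v)).getD 0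

def makeValues : List Char → PySem.Dict Char Int → PySem.Dict Char Int
  | [], d => d
  | c :: rest, d =>
    if d.contains c then makeValues rest d
    else makeValues rest (d.insert c (mvMax d + 1))

def ppn (word : String) : String :=
  match word.toList with
  | [] => ""   -- unreachable under Pre_ppn: Python A raises IndexError on word[0]
  | c :: rest =>
    let values := makeValues rest ((PySem.Dict.empty : PySem.Dict Char Int).insert c 1)
    -- values[letter] never misses (every letter of word is a key), so getD's default is never used
    PySem.Str.join "-" ((c :: rest).map (fun ch => PySem.Int.toStr (values.getD ch 0)))

-- ===== PORT B =====
def pbLoop : List Char → PySem.Dict Char Int → Int → PySem.Dict Char Int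
  | [], d, _ => d
  | c :: rest, d, nxt =>
    if d.contains c then pbLoop rest d nxt
    else pbLoop rest (d.insert c nxt) (nxt + 1)

def ppn_alt (word : String) : String :=
  let values := pbLoop word.toList PySem.Dict.empty 1
  PySem.Str.join "-" (word.toList.map (fun ch => PySem.Int.toStr (values.getD ch 0)))

-- ===== PRECONDITION & SPEC =====
-- Pre_ excludes only the empty string, on which A raises IndexError (word[0]).
def Pre_ppn (word : String) : Prop := word ≠ ""
instance (word : String) : Decidable (Pre_ppn word) := by unfold Pre_ppn; infer_instance
def pvWitness_ppn : String := "abca"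

def Spec_ppn (word : String) (out : String) : Prop := out = ppn_alt word
instance (word : String) (out : String) : Decidable (Spec_ppn word out) := by unfold Spec_ppn; infer_instance

-- ===== CLAIM (what is proved, stated in full; the proofs are below) =====
def Claim_equal_ppn : Prop := ∀ (word : String), Dom_ppn word → Pre_ppn word → Spec_ppn word (ppn word)

-- ===== LEMMAS AND PROOFS =====

-- the value list [1, 2, …, n] a dict holds after assigning first-appearance numbers
def pvVals (n : Nat) : List Int := (List.range n).map (fun i : Nat => (i : Int) + 1)

theorem pvVals_succ (n : Nat) : pvVals (n + 1) = pvVals n ++ [(n : Int) + 1] := by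
  simp [pvVals, List.range_succ]

theorem pvMvMax_of_vals (d : PySem.Dict Char Int) (n : Nat) (h : d.values = pvVals n) :
    mvMax d = (n : Int) := by
  unfold mvMax
  cases n with
  | zero =>
    have hnil : d.values = [] := by simpa [pvVals] using h
    simp [(PySem.List.max?_eq_none_iff _ _).mpr hnil]
  | succ m =>
    have hmem : ((m : Int) + 1) ∈ d.values := by
      rw [h]
      simp only [pvVals, List.mem_map, List.mem_range]
      exact ⟨m, Nat.lt_succ_self m, rfl⟩
    obtain ⟨x, hx⟩ : ∃ x, PySem.List.max? d.values (fun v => v) = some x := by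
      cases hmax : PySem.List.max? d.values (fun v => v) with
      | none =>
        exact absurd ((PySem.List.max?_eq_none_iff _ _).mp hmax ▸ hmem) (List.not_mem_nil)
      | some x => exact ⟨x, rfl⟩
    have hxmem : x ∈ d.values := PySem.List.max?_mem hx
    have hle : ((m : Int) + 1) ≤ x := PySem.List.max?_isMax hx _ hmem
    have hub : x ≤ (m : Int) + 1 := by
      rw [h] at hxmem
      simp only [pvVals, List.mem_map, List.mem_range] at hxmem
      obtain ⟨i, hi, rfl⟩ := hxmem
      omega
    rw [hx]
    simp only [Option.getD_some]
    push_cast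
    omega

theorem pvValues_insert_fresh (d : PySem.Dict Char Int) (c : Char) (v : Int)
    (h : d.contains c = false) : (d.insert c v).values = d.values ++ [v] := by
  simp [PySem.Dict.values, PySem.Dict.items_insert_of_not_contains d v h]

theorem pvMake_eq_loop (l : List Char) (d : PySem.Dict Char Int) (n : Nat)
    (h : d.values = pvVals n) : makeValues l d = pbLoop l d ((n : Int) + 1) := by
  induction l generalizing d n with
  | nil => rfl
  | cons c rest ih =>
    by_cases hc : d.contains c = true
    · simp only [makeValues, pbLoop, hc, if_pos]
      exact ih d n h
    · have hc' : d.contains c = false := by simpa using hc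
      simp only [makeValues, pbLoop, hc', Bool.false_eq_true, if_neg, not_false_iff]
      rw [pvMvMax_of_vals d n h]
      have hv : (d.insert c ((n : Int) + 1)).values = pvVals (n + 1) := by
        rw [pvValues_insert_fresh d c _ hc', h, pvVals_succ]
      have := ih (d.insert c ((n : Int) + 1)) (n + 1) hv
      push_cast at this ⊢
      exact this

-- ===== VERDICT (by name: the statement is the Claim_ definition above) =====
theorem ppn_spec : Claim_equal_ppn := by
  intro word _ hpre
  unfold Spec_ppn ppn ppn_alt
  cases hw : word.toList with
  | nil => exact absurd (by simpa using hw) hpre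
  | cons c rest =>
    have h1 : ((PySem.Dict.empty : PySem.Dict Char Int).insert c 1).values = pvVals 1 := by
      simp [PySem.Dict.values, PySem.Dict.insert, PySem.Dict.empty, pvVals]
    have hce : (PySem.Dict.empty : PySem.Dict Char Int).contains c = false := by
      simp [PySem.Dict.contains_empty]
    have hmk : makeValues rest ((PySem.Dict.empty : PySem.Dict Char Int).insert c 1)
        = pbLoop (c :: rest) PySem.Dict.empty 1 := by
      rw [pbLoop]
      simp only [hce, Bool.false_eq_true, if_neg, not_false_iff]
      have := pvMake_eq_loop rest ((PySem.Dict.empty : PySem.Dict Char Int).insert c 1) 1 h1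
      norm_num at this
      exact this
    dsimp only
    rw [hmk]
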